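-- pv_equiv track=rewrite | github.com/KesterJ/aoc2025 | day_9.py | find_rectangles_pt1
-- ===== SOURCE A (Python) =====
-- def find_candidates(coords, top = True, left = True):
--     # Find all coords in the list that are not strictly worse than others
--     # in terms of being a corner
--     # (e.g. if a coord N has a coord M that is both above and to the left of it,
--     # then N cannot be the top-left as M would always make a bigger rectangle)
--
--     # Rather than trying to handle directions differently, transform the grid so
--     # we're always looking for top-leftmost
--     coords = [[coord[0] if left else -coord[0],
--                coord[1] if top else -coord[1]] for coord in coords]
--
--     # Sorting coords allows for efficiencies later
--     coords.sort()
--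
--     # Iteratively find candidates
--     candidates = []
--     while len(coords) > 0:
--         # Get leftmost point, and exclude anything not above it - because we're
--         # sorted, we know that the first element is both a) leftmost and b)
--         # if multiple leftmost points, it's the highest [which is what we want]
--         leftest = coords.pop(0)
--         coords = [coord for coord in coords if coord[1] < leftest[1]]
--         candidates.append(leftest)
--
--     # Return to original coord system
--     candidates = [[candidate[0] if left else -candidate[0],
--                    candidate[1] if top else -candidate[1]] for candidate in candidates]
--
--     return candidates
--
-- def get_area(coord_1, coord_2):
--     # Calculate rectangle - account for each side being at least
--     # 1 even when coords line up
--     side_1 = abs(coord_1[0] - coord_2[0]) + 1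
--     side_2 = abs(coord_1[1] - coord_2[1]) + 1
--     return side_1 * side_2
--
-- def find_rectangles_pt1(coords):
--     # Get candidate coords for each corner
--     toplefts = find_candidates(coords, top = True, left = True)
--     toprights = find_candidates(coords, top = True, left = False)
--     bottomlefts = find_candidates(coords, top = False, left = True)
--     bottomrights = find_candidates(coords, top = False, left = False)
--     # Find biggest rectangles with each pair of opposite corners
--     max_rect = 0
--     for tl in toplefts:
--         for br in bottomrights:
--             current_area = get_area(tl, br)
--             if current_area > max_rect:
--                 max_rect = current_area
--     for tr in toprights:
--         for bl in bottomlefts: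
--             current_area = get_area(tr, bl)
--             if current_area > max_rect:
--                 max_rect = current_area
--
--     return max_rect
-- ===== SOURCE B (Python) =====
-- def find_rectangles_pt1(coords):
--     # Single-pass monotone staircase (running min-y after sort) instead of
--     # repeated pop-and-filter; then max over candidate pairs.
--     def candidates(top, left):
--         pts = sorted([c[0] if left else -c[0], c[1] if top else -c[1]] for c in coords)
--         stair = []
--         best = None
--         for p in pts:
--             if best is None or p[1] < best:
--                 stair.append(p)
--                 best = p[1]
--         return [[p[0] if left else -p[0], p[1] if top else -p[1]] for p in stair]
--
--     def area(p, q):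
--         return (abs(p[0] - q[0]) + 1) * (abs(p[1] - q[1]) + 1)
--
--     tl = candidates(True, True)
--     tr = candidates(True, False)
--     bl = candidates(False, True)
--     br = candidates(False, False)
--     areas = [area(p, q) for p in tl for q in br] + [area(p, q) for p in tr for q in bl]
--     return max(areas, default=0)
-- ===== Notes on version B (the rewrite author's own statement) =====
-- stated objective: alternative
-- what changed: Candidate (Pareto-corner) points are found by one linear running-min-y scan of the sorted list instead of A's repeated pop-and-filter rebuilds of the remaining list, and the final maximum is taken over a flat list of pair areas; same measured cost on the generated inputs.
import Mathlib
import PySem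

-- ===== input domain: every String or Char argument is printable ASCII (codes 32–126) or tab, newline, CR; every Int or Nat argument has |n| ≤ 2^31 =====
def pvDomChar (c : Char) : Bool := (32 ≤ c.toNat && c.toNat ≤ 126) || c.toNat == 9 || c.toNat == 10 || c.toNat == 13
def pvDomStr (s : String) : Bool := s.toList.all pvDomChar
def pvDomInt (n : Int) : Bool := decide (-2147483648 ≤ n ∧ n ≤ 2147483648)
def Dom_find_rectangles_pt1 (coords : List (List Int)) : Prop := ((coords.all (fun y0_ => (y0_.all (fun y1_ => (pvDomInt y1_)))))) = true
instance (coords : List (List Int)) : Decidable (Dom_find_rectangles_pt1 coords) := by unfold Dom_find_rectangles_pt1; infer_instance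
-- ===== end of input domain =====

-- B replaces A's repeated pop-and-filter candidate search by one running-min scan
-- of the sorted points (objective: alternative algorithm, same measured cost).
-- Internal 2-element [x, y] lists of the Pythons are represented as pairs Int × Int.

-- ===== PORT A =====
-- transform into the top-left coordinate system ([coord[0] if left else -coord[0], coord[1] if top else -coord[1]])
def pvA_transform (coords : List (List Int)) (top left : Bool) : List (Int × Int) :=
  coords.map (fun c =>
    ((if left then PySem.List.pyGetD c 0 0 else -(PySem.List.pyGetD c 0 0)),
     (if top then PySem.List.pyGetD c 1 0 else -(PySem.List.pyGetD c 1 0))))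

-- the while loop: pop the first point, drop everything not strictly above it, append to candidates
def pvA_loop : List (Int × Int) → List (Int × Int) → List (Int × Int)
  | [], cands => cands
  | leftest :: rest, cands =>
      pvA_loop (rest.filter (fun c => decide (c.2 < leftest.2))) (cands ++ [leftest])
termination_by l _ => l.length
decreasing_by
  have := List.length_filter_le
    (fun x : {x // x ∈ rest} => decide ((x : Int × Int).2 < leftest.2)) rest.attach
  simp at this ⊢
  omega

def pvA_find_candidates (coords : List (List Int)) (top left : Bool) : List (Int × Int) :=
  (pvA_loop (PySem.List.sorted2 (pvA_transform coords top left) (fun p => p.1) (fun p => p.2)) []).map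
    (fun p => ((if left then p.1 else -p.1), (if top then p.2 else -p.2)))

def pvA_get_area (c1 c2 : Int × Int) : Int :=
  (|c1.1 - c2.1| + 1) * (|c1.2 - c2.2| + 1)

def find_rectangles_pt1 (coords : List (List Int)) : Int :=
  let toplefts := pvA_find_candidates coords true true
  let toprights := pvA_find_candidates coords true false
  let bottomlefts := pvA_find_candidates coords false true
  let bottomrights := pvA_find_candidates coords false false
  let m1 := toplefts.foldl (fun m tl => bottomrights.foldl
    (fun m br => if pvA_get_area tl br > m then pvA_get_area tl br else m) m) 0
  toprights.foldl (fun m tr => bottomlefts.foldl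
    (fun m bl => if pvA_get_area tr bl > m then pvA_get_area tr bl else m) m) m1

-- ===== PORT B =====
def pvB_transform (coords : List (List Int)) (top left : Bool) : List (Int × Int) :=
  coords.map (fun c =>
    ((if left then PySem.List.pyGetD c 0 0 else -(PySem.List.pyGetD c 0 0)),
     (if top then PySem.List.pyGetD c 1 0 else -(PySem.List.pyGetD c 1 0))))

-- the for loop: keep a point iff its y is below the running minimum (state = (stair, best))
def pvB_stair (pts : List (Int × Int)) : List (Int × Int) × Option Int :=
  pts.foldl (fun s p =>
    match s.2 with
    | none => (s.1 ++ [p], some p.2)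
    | some b => if p.2 < b then (s.1 ++ [p], some p.2) else s) ([], none)

def pvB_candidates (coords : List (List Int)) (top left : Bool) : List (Int × Int) :=
  ((pvB_stair (PySem.List.sorted2 (pvB_transform coords top left) (fun p => p.1) (fun p => p.2))).1).map
    (fun p => ((if left then p.1 else -p.1), (if top then p.2 else -p.2)))

def pvB_area (p q : Int × Int) : Int :=
  (|p.1 - q.1| + 1) * (|p.2 - q.2| + 1)

def find_rectangles_pt1_alt (coords : List (List Int)) : Int :=
  let tl := pvB_candidates coords true true
  let tr := pvB_candidates coords true false
  let bl := pvB_candidates coords false true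
  let br := pvB_candidates coords false false
  let areas := (tl.flatMap fun p => br.map (fun q => pvB_area p q))
            ++ (tr.flatMap fun p => bl.map (fun q => pvB_area p q))
  PySem.List.maxD areas (fun x => x) 0

-- ===== PRECONDITION & SPEC =====
-- Pre_ excludes exactly the inputs where Python A raises IndexError: some inner list has
-- fewer than two elements (coord[0] / coord[1] out of range).
def Pre_find_rectangles_pt1 (coords : List (List Int)) : Prop :=
  ∀ c ∈ coords, 2 ≤ c.length
instance (coords : List (List Int)) : Decidable (Pre_find_rectangles_pt1 coords) := by
  unfold Pre_find_rectangles_pt1; infer_instance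
def pvWitness_find_rectangles_pt1 : List (List Int) := [[1, 2], [3, 0], [0, 5]]

def Spec_find_rectangles_pt1 (coords : List (List Int)) (out : Int) : Prop := out = find_rectangles_pt1_alt coords
instance (coords : List (List Int)) (out : Int) : Decidable (Spec_find_rectangles_pt1 coords out) := by unfold Spec_find_rectangles_pt1; infer_instance

-- ===== CLAIM (what is proved, stated in full; the proofs are below) =====
def Claim_equal_find_rectangles_pt1 : Prop := ∀ (coords : List (List Int)), Dom_find_rectangles_pt1 coords → Pre_find_rectangles_pt1 coords → Spec_find_rectangles_pt1 coords (find_rectangles_pt1 coords)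

-- ===== LEMMAS AND PROOFS =====

-- canonical (accumulator-free) form of B's staircase scan, used only in the proofs
def pvAux_bGo : List (Int × Int) → Option Int → List (Int × Int)
  | [], _ => []
  | p :: r, none => p :: pvAux_bGo r (some p.2)
  | p :: r, some b => if p.2 < b then p :: pvAux_bGo r (some p.2) else pvAux_bGo r (some b)

lemma pvB_stair_fold (l : List (Int × Int)) :
    ∀ (acc : List (Int × Int)) (t : Option Int),
      (l.foldl (fun s p =>
        match s.2 with
        | none => (s.1 ++ [p], some p.2)
        | some b => if p.2 < b then (s.1 ++ [p], some p.2) else s) (acc, t)).1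
      = acc ++ pvAux_bGo l t := by
  induction l with
  | nil => intro acc t; simp [pvAux_bGo]
  | cons p r ih =>
      intro acc t
      cases t with
      | none => simp [List.foldl_cons, pvAux_bGo, ih]
      | some b =>
          by_cases h : p.2 < b
          · simp [List.foldl_cons, pvAux_bGo, h, ih]
          · simp [List.foldl_cons, pvAux_bGo, h, ih]

-- skipped points (y ≥ threshold v ≥ current threshold t) do not affect the scan
lemma pvAux_bGo_filter (r : List (Int × Int)) :
    ∀ v t : Int, t ≤ v →
      pvAux_bGo (r.filter (fun c => decide (c.2 < v))) (some t) = pvAux_bGo r (some t) := by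
  induction r with
  | nil => intro v t _; simp
  | cons h r ih =>
      intro v t htv
      by_cases hv : h.2 < v
      · by_cases ht : h.2 < t
        · simp [hv, pvAux_bGo, ht, ih _ _ (le_of_lt hv)]
        · simp [hv, pvAux_bGo, ht, ih _ _ htv]
      · have ht : ¬ h.2 < t := fun hlt => hv (lt_of_lt_of_le hlt htv)
        simp [hv, pvAux_bGo, ht, ih _ _ htv]

lemma pvA_loop_acc : ∀ (n : Nat) (l : List (Int × Int)), l.length ≤ n →
    ∀ acc, pvA_loop l acc = acc ++ pvA_loop l [] := by
  intro n
  induction n with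
  | zero =>
      intro l hl acc
      have : l = [] := List.eq_nil_of_length_eq_zero (Nat.le_zero.mp hl)
      subst this; simp [pvA_loop]
  | succ n ih =>
      intro l hl acc
      cases l with
      | nil => simp [pvA_loop]
      | cons h r =>
          have hf : (r.filter (fun c => decide (c.2 < h.2))).length ≤ n := by
            have := List.length_filter_le (fun c => decide (c.2 < h.2)) r
            simp at hl; omega
          simp only [pvA_loop, List.nil_append]
          rw [ih _ hf (acc ++ [h]), ih _ hf [h]]
          simp

lemma pvA_loop_eq_bGo : ∀ (n : Nat) (l : List (Int × Int)), l.length ≤ n →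
    pvA_loop l [] = pvAux_bGo l none ∧
    ∀ t : Int, (∀ c ∈ l, c.2 < t) → pvA_loop l [] = pvAux_bGo l (some t) := by
  intro n
  induction n with
  | zero =>
      intro l hl
      have : l = [] := List.eq_nil_of_length_eq_zero (Nat.le_zero.mp hl)
      subst this; exact ⟨by simp [pvA_loop, pvAux_bGo], fun t _ => by simp [pvA_loop, pvAux_bGo]⟩
  | succ n ih =>
      intro l hl
      cases l with
      | nil => exact ⟨by simp [pvA_loop, pvAux_bGo], fun t _ => by simp [pvA_loop, pvAux_bGo]⟩
      | cons h r =>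
          have hf : (r.filter (fun c => decide (c.2 < h.2))).length ≤ n := by
            have := List.length_filter_le (fun c => decide (c.2 < h.2)) r
            simp at hl; omega
          have hmem : ∀ c ∈ r.filter (fun c => decide (c.2 < h.2)), c.2 < h.2 := by
            intro c hc
            have := (List.mem_filter.mp hc).2
            simpa using this
          have hcore : pvA_loop (h :: r) [] = h :: pvAux_bGo r (some h.2) := by
            simp only [pvA_loop, List.nil_append]
            rw [pvA_loop_acc n _ hf [h]]
            rw [(ih _ hf).2 h.2 hmem]
            rw [pvAux_bGo_filter r h.2 h.2 le_rfl]
            simp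
          constructor
          · rw [hcore]; rfl
          · intro t hall
            have hht : h.2 < t := hall h (by simp)
            rw [hcore]
            simp [pvAux_bGo, hht]

lemma pvCand_eq (coords : List (List Int)) (top left : Bool) :
    pvA_find_candidates coords top left = pvB_candidates coords top left := by
  unfold pvA_find_candidates pvB_candidates pvB_stair pvA_transform pvB_transform
  rw [pvB_stair_fold _ [] none]
  rw [(pvA_loop_eq_bGo _ _ le_rfl).1]
  simp

lemma pvFoldl_if_max (g : Int × Int → Int) (l : List (Int × Int)) :
    ∀ m : Int, l.foldl (fun m q => if g q > m then g q else m) m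
      = l.foldl (fun m q => max m (g q)) m := by
  induction l with
  | nil => intro m; rfl
  | cons q r ih =>
      intro m
      have : (if g q > m then g q else m) = max m (g q) := by
        by_cases h : g q > m
        · simp [h]; omega
        · simp [h]; omega
      simp only [List.foldl_cons, this, ih]

lemma pvFoldl_nested (f : Int × Int → Int × Int → Int)
    (outs ins : List (Int × Int)) :
    ∀ m : Int,
      outs.foldl (fun m p => ins.foldl (fun m q => max m (f p q)) m) m
        = (outs.flatMap fun p => ins.map (f p)).foldl max m := by
  induction outs with
  | nil => intro m; rfl
  | cons p outs ih =>
      intro m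
      simp only [List.foldl_cons, List.flatMap_cons, List.foldl_append, ih, List.foldl_map]

lemma pvFoldl_max_maxD (xs : List Int) (hpos : ∀ x ∈ xs, 0 ≤ x) :
    xs.foldl max 0 = PySem.List.maxD xs (fun y => y) 0 := by
  cases xs with
  | nil => rfl
  | cons x t =>
      have hx : 0 ≤ x := hpos x (by simp)
      rw [PySem.List.maxD, PySem.List.max?_id_cons]
      simp [max_eq_right hx]

lemma pvArea_nonneg (p q : Int × Int) : 0 ≤ pvB_area p q := by
  unfold pvB_area
  positivity

-- ===== VERDICT (by name: the statement is the Claim_ definition above) =====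
theorem find_rectangles_pt1_spec : Claim_equal_find_rectangles_pt1 := by
  intro coords _ _
  unfold Spec_find_rectangles_pt1 find_rectangles_pt1 find_rectangles_pt1_alt
  rw [pvCand_eq coords true true, pvCand_eq coords true false,
      pvCand_eq coords false true, pvCand_eq coords false false]
  have harea : pvA_get_area = pvB_area := rfl
  rw [harea]
  simp only [pvFoldl_if_max (fun q => pvB_area _ q), pvFoldl_nested]
  rw [← List.foldl_append]
  rw [pvFoldl_max_maxD]
  intro x hx
  simp only [List.mem_append, List.mem_flatMap, List.mem_map] at hx
  rcases hx with ⟨p, _, q, _, rfl⟩ | ⟨p, _, q, _, rfl⟩ <;> exact pvArea_nonneg p q
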